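-- pv_equiv track=rewrite | github.com/pypi-data/pypi-mirror-377 | packages/game-collection/game_collection-1.1.1-py3-none-any.whl/game/games/logic.py | clear_tetris_lines
-- ===== SOURCE A (Python) =====
-- def clear_tetris_lines(grid: list[list[int]]) -> tuple[list[list[int]], int]:
--     """Очистка заполненных линий в тетрисе."""
--     grid_width = len(grid[0])
--     lines_to_clear = []
--
--     for y in range(len(grid)):
--         if all(grid[y][x] != 0 for x in range(grid_width)):
--             lines_to_clear.append(y)
--
--     # Удаление линий
--     new_grid = [row[:] for row in grid]  # Создаем копию
--
--     # Удаляем линии в обратном порядке, чтобы индексы не сдвигались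
--     for y in reversed(lines_to_clear):
--         del new_grid[y]
--
--     # Добавляем пустые линии сверху
--     for _ in range(len(lines_to_clear)):
--         new_grid.insert(0, [0 for _ in range(grid_width)])
--
--     return new_grid, len(lines_to_clear)
-- ===== SOURCE B (Python) =====
-- def clear_tetris_lines(grid: list[list[int]]) -> tuple[list[list[int]], int]:
--     """Очистка заполненных линий в тетрисе: один проход фильтра со счётчиком."""
--     grid_width = len(grid[0])
--     new_grid = []
--     cleared = 0
--     for row in grid:
--         if 0 in row[:grid_width]:
--             new_grid.append(row[:])
--         else:
--             cleared += 1
--     return [[0] * grid_width for _ in range(cleared)] + new_grid, cleared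
-- ===== Notes on version B (the rewrite author's own statement) =====
-- stated objective: simpler
-- what changed: A's four phases (collect full-row indices, copy all rows, delete collected indices in reverse, insert empty rows at the front one by one) are replaced by a single filter-and-count pass over the rows followed by prepending the cleared number of empty rows; this avoids A's O(n) element shifting per deleted/inserted row.
import Mathlib
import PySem

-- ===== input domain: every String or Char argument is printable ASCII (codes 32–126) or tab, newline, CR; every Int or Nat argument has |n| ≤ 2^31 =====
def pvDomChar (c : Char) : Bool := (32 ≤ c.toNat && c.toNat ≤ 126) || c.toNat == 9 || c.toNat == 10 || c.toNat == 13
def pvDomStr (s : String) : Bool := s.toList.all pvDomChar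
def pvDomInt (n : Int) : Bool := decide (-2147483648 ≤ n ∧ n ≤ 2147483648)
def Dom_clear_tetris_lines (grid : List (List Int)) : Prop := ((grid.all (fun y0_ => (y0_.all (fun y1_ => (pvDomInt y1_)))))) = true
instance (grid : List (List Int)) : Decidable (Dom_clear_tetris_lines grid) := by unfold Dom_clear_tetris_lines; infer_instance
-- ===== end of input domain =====

-- B replaces A's collect-indices / copy / reverse-delete / insert phases by one filter-and-count
-- pass plus a prepended block of empty rows (objective: simpler; return value only — A copies rows).

-- ===== PORT A =====
def clear_tetris_lines (grid : List (List Int)) : List (List Int) × Int :=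
  -- grid_width = len(grid[0])  (grid[0] raises on []; Pre_ excludes that, getD [] is junk outside Pre_)
  let grid_width : Int := (((PySem.List.pyGet? grid 0).getD []).length : Int)
  -- for y in range(len(grid)): if all(grid[y][x] != 0 for x in range(grid_width)): lines_to_clear.append(y)
  let lines_to_clear : List Int :=
    (PySem.List.pyRange 0 (grid.length : Int) 1).foldl
      (fun lines y =>
        if (PySem.List.pyRange 0 grid_width 1).all
             (fun x => decide (PySem.List.pyGetD (PySem.List.pyGetD grid y []) x 0 ≠ 0))
        then lines ++ [y] else lines) []
  -- new_grid = [row[:] for row in grid]  (row[:] copies the row; the value is the row itself)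
  let new_grid : List (List Int) := grid.map (fun row => row)
  -- for y in reversed(lines_to_clear): del new_grid[y]   (y is a valid nonneg index here, so toNat is exact)
  let new_grid : List (List Int) :=
    lines_to_clear.reverse.foldl (fun g y => g.eraseIdx y.toNat) new_grid
  -- for _ in range(len(lines_to_clear)): new_grid.insert(0, [0 for _ in range(grid_width)])
  let new_grid : List (List Int) :=
    (PySem.List.pyRange 0 (lines_to_clear.length : Int) 1).foldl
      (fun g _ => ((PySem.List.pyRange 0 grid_width 1).map (fun _ => (0 : Int))) :: g) new_grid
  (new_grid, (lines_to_clear.length : Int))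

-- ===== PORT B =====
def clear_tetris_lines_alt (grid : List (List Int)) : List (List Int) × Int :=
  -- grid_width = len(grid[0])
  let grid_width : Int := (((PySem.List.pyGet? grid 0).getD []).length : Int)
  -- for row in grid: if 0 in row[:grid_width]: new_grid.append(row[:]) else: cleared += 1
  let p : List (List Int) × Int :=
    grid.foldl
      (fun acc row =>
        if (PySem.List.slice row (some 0) (some grid_width)).contains 0
        then (acc.1 ++ [row], acc.2) else (acc.1, acc.2 + 1)) ([], (0 : Int))
  -- return [[0] * grid_width for _ in range(cleared)] + new_grid, cleared
  (((PySem.List.pyRange 0 p.2 1).map (fun _ => PySem.List.pyRepeat [(0 : Int)] grid_width)) ++ p.1, p.2)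

-- ===== PRECONDITION & SPEC =====
-- Pre_ excludes exactly the inputs on which the Python A raises IndexError: the empty grid
-- (grid[0]), and grids with a row shorter than len(grid[0]) whose cells are all nonzero
-- (the generator grid[y][x] runs past the row's end before hitting a zero).
def Pre_clear_tetris_lines (grid : List (List Int)) : Prop :=
  grid ≠ [] ∧ ∀ row ∈ grid, ((grid.headD []).length ≤ row.length ∨ (0 : Int) ∈ row)
instance (grid : List (List Int)) : Decidable (Pre_clear_tetris_lines grid) := by
  unfold Pre_clear_tetris_lines; infer_instance

def pvWitness_clear_tetris_lines : List (List Int) := [[1, 1], [0, 1]]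

def Spec_clear_tetris_lines (grid : List (List Int)) (out : List (List Int) × Int) : Prop := out = clear_tetris_lines_alt grid
instance (grid : List (List Int)) (out : List (List Int) × Int) : Decidable (Spec_clear_tetris_lines grid out) := by unfold Spec_clear_tetris_lines; infer_instance

-- ===== CLAIM (what is proved, stated in full; the proofs are below) =====
def Claim_equal_clear_tetris_lines : Prop := ∀ (grid : List (List Int)), Dom_clear_tetris_lines grid → Pre_clear_tetris_lines grid → Spec_clear_tetris_lines grid (clear_tetris_lines grid)

-- ===== LEMMAS AND PROOFS =====

lemma allNZ (row : List Int) (w : Nat) (h : w ≤ row.length ∨ (0:Int) ∈ row) :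
    (List.range w).all (fun i => decide (row.getD i 0 ≠ 0)) = !((row.take w).contains (0:Int)) := by
  induction row generalizing w with
  | nil =>
    have : w = 0 := by simpa using h
    subst this; simp
  | cons a t ih =>
    cases w with
    | zero => simp
    | succ v =>
      rw [List.range_succ_eq_map]
      by_cases ha : a = 0
      · subst ha; simp
      · simp only [List.all_cons, List.take_succ_cons, List.contains_cons,
          List.getD_cons_zero, List.all_map, Function.comp_def, List.getD_cons_succ]
        have h' : v ≤ t.length ∨ (0:Int) ∈ t := by
          rcases h with h | h
          · left; simpa using h
          · right; simpa [ha] using (by simpa using h : (0:Int) = a ∨ (0:Int) ∈ t).resolve_left (by simp [Ne.symm ha])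
        rw [ih v h']
        simp [ha, Ne.symm ha]

lemma allNZ' (row : List Int) (w : Nat) (h : w ≤ row.length ∨ (0:Int) ∈ row) :
    (PySem.List.pyRange 0 (w:Int) 1).all (fun x => decide (PySem.List.pyGetD row x 0 ≠ 0))
      = !((row.take w).contains (0:Int)) := by
  rw [PySem.List.pyRange_zero_nat, List.all_map]
  have hc : ((fun x => decide (PySem.List.pyGetD row x 0 ≠ 0)) ∘ fun k : Nat => (k:Int))
       = fun i : Nat => decide (row.getD i 0 ≠ 0) := by
    funext i; simp [PySem.List.pyGetD_natCast]
  rw [hc]; exact allNZ row w h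

lemma eraseShift (l : List Nat) (a : List Int) (t : List (List Int)) :
    (l.map Nat.succ).foldl (fun h i => h.eraseIdx i) (a :: t)
      = a :: l.foldl (fun h i => h.eraseIdx i) t := by
  induction l generalizing t with
  | nil => rfl
  | cons x xs ih => simp only [List.map_cons, List.foldl_cons, Nat.succ_eq_add_one,
      List.eraseIdx_cons_succ, ih]

lemma eraseFilter (g : List (List Int)) (p : List Int → Bool) :
    (((List.range g.length).filter (fun i => p (g.getD i []))).reverse).foldl
        (fun h i => h.eraseIdx i) g
      = g.filter (fun r => !p r) := by
  induction g with
  | nil => simp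
  | cons a t ih =>
    have hcomp : ((fun i => p ((a :: t).getD i [])) ∘ Nat.succ) = (fun i => p (t.getD i [])) := by
      funext i; simp
    rw [List.length_cons, List.range_succ_eq_map, List.filter_cons, List.filter_map, hcomp]
    simp only [List.getD_cons_zero]
    by_cases ha : p a
    · rw [if_pos ha, List.reverse_cons, ← List.map_reverse, List.foldl_append, eraseShift,
        List.foldl_cons, List.eraseIdx_cons_zero, List.foldl_nil, ih,
        List.filter_cons_of_neg (by simp [ha])]
    · rw [if_neg (by simp [ha]), ← List.map_reverse, eraseShift, ih,
        List.filter_cons_of_pos (by simp [ha])]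

lemma filterRangeLen (g : List (List Int)) (p : List Int → Bool) :
    ((List.range g.length).filter (fun i => p (g.getD i []))).length
      = (g.filter p).length := by
  induction g with
  | nil => simp
  | cons a t ih =>
    have hcomp : ((fun i => p ((a :: t).getD i [])) ∘ Nat.succ) = (fun i => p (t.getD i [])) := by
      funext i; simp
    rw [List.length_cons, List.range_succ_eq_map, List.filter_cons, List.filter_map, hcomp,
      List.filter_cons]
    simp only [List.getD_cons_zero]
    by_cases ha : p a
    · rw [if_pos ha, if_pos ha]
      simp only [List.length_cons, List.length_map]
      omega
    · rw [if_neg ha, if_neg ha]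
      simp only [List.length_map]
      omega

lemma foldConsConst {β : Type} (l : List β) (e : List Int) (init : List (List Int)) :
    l.foldl (fun g _ => e :: g) init = List.replicate l.length e ++ init := by
  induction l generalizing init with
  | nil => rfl
  | cons x xs ih =>
    simp only [List.foldl_cons, ih, List.length_cons, List.replicate_succ']
    simp [List.append_assoc]

-- ===== VERDICT (by name: the statement is the Claim_ definition above) =====
theorem clear_tetris_lines_spec : Claim_equal_clear_tetris_lines := by
  intro grid _ hpre
  obtain ⟨hne, hrow⟩ := hpre
  obtain ⟨r0, rest, rfl⟩ : ∃ a t, grid = a :: t := by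
    cases grid with
    | nil => exact absurd rfl hne
    | cons a t => exact ⟨a, t, rfl⟩
  have hget : (PySem.List.pyGet? (r0 :: rest) 0).getD [] = r0 := by simp [pysem]
  unfold Spec_clear_tetris_lines clear_tetris_lines clear_tetris_lines_alt
  simp only [hget]
  rw [PySem.List.foldl_append_if (f := fun y => y)]
  simp only [List.map_id', List.nil_append]
  have hfilter : List.filter
        (fun y => (PySem.List.pyRange 0 ((r0.length : Int)) 1).all fun x =>
          decide (PySem.List.pyGetD (PySem.List.pyGetD (r0 :: rest) y []) x 0 ≠ 0))
        (PySem.List.pyRange 0 (((r0 :: rest).length : Int)) 1)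
      = List.map (fun k : Nat => (k : Int))
          (List.filter (fun i => !((((r0 :: rest).getD i []).take r0.length).contains (0:Int)))
            (List.range (r0 :: rest).length)) := by
    rw [PySem.List.pyRange_zero_nat ((r0 :: rest).length), List.filter_map]
    refine congrArg _ (List.filter_congr ?_)
    intro i hi
    have hi' : i < (r0 :: rest).length := List.mem_range.mp hi
    have hmem : (r0 :: rest).getD i [] ∈ r0 :: rest := by
      rw [List.getD_eq_getElem _ _ hi']
      exact List.getElem_mem hi'
    have hcond := hrow _ hmem
    simp only [List.headD_cons] at hcond
    simp only [Function.comp_apply, PySem.List.pyGetD_natCast]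
    exact allNZ' _ _ hcond
  rw [hfilter]
  simp only [List.length_map]
  rw [← List.map_reverse, List.foldl_map]
  simp only [Int.toNat_natCast]
  rw [eraseFilter (r0 :: rest) (fun row => !((row.take r0.length).contains (0:Int))),
      filterRangeLen (r0 :: rest) (fun row => !((row.take r0.length).contains (0:Int))),
      foldConsConst]
  simp only [Bool.not_not, PySem.List.length_pyRange_one, Int.sub_zero, Int.toNat_natCast]
  -- B side
  simp only [PySem.List.slice_zero_start, PySem.List.slice_to_natCast]
  have hbody : (fun (acc : List (List Int) × Int) row =>
        if (List.take r0.length row).contains (0:Int) = true then (acc.1 ++ [row], acc.2)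
        else (acc.1, acc.2 + 1))
      = fun (acc : List (List Int) × Int) row =>
          ((fun (g : List (List Int)) row =>
              if (List.take r0.length row).contains (0:Int) = true then g ++ [row] else g) acc.1 row,
           (fun (k : Int) row =>
              if (!((List.take r0.length row).contains (0:Int))) = true then k + 1 else k) acc.2 row) := by
    funext acc row
    cases h : (List.take r0.length row).contains (0:Int) <;>
      simp only [h, Bool.false_eq_true, if_false, if_true, Bool.not_false, Bool.not_true]
  rw [hbody, PySem.List.foldl_prod_mk
        (f := fun (g : List (List Int)) row =>
          if (List.take r0.length row).contains (0:Int) = true then g ++ [row] else g)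
        (g := fun (k : Int) row =>
          if (!((List.take r0.length row).contains (0:Int))) = true then k + 1 else k),
      PySem.List.foldl_append_if (f := fun r => r), PySem.List.foldl_if_add_one]
  simp only [List.map_id', List.nil_append, zero_add, List.countP_eq_length_filter,
    PySem.List.length_pyRange_one, Int.sub_zero, Int.toNat_natCast, List.map_const',
    PySem.List.pyRepeat_singleton]
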